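-- pv_equiv track=rewrite | github.com/mellery/project_euler | problem61.py | get_pent
-- ===== SOURCE A (Python) =====
-- def get_pent(limit):
--     results = []
--     i = 1
--     while(1):
--         n = i*(3*i-1)//2
--         i = i + 1
--         if n < limit:
--             if n >= 1000:
--                 results.append(n)
--         else:
--             return results
-- ===== SOURCE B (Python) =====
-- def _first_pent_at_least(target):
--     # smallest i >= 1 with i*(3*i-1)//2 >= target (pent(i) >= i, so pent(max(1,target)) >= target)
--     lo, hi = 1, max(1, target)
--     while lo < hi:
--         mid = (lo + hi) // 2
--         if mid * (3 * mid - 1) // 2 < target: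
--             lo = mid + 1
--         else:
--             hi = mid
--     return lo
--
-- def get_pent(limit):
--     start = _first_pent_at_least(1000)
--     stop = _first_pent_at_least(limit)
--     return [i * (3 * i - 1) // 2 for i in range(start, stop)]
-- ===== Notes on version B (the rewrite author's own statement) =====
-- stated objective: alternative
-- what changed: B finds the index bounds by binary search on the monotone pentagonal sequence (first index with pent>=1000, first with pent>=limit) and emits the values with one comprehension, instead of A's unbounded while-loop that tests every pentagonal number against both thresholds.
import Mathlib
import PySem

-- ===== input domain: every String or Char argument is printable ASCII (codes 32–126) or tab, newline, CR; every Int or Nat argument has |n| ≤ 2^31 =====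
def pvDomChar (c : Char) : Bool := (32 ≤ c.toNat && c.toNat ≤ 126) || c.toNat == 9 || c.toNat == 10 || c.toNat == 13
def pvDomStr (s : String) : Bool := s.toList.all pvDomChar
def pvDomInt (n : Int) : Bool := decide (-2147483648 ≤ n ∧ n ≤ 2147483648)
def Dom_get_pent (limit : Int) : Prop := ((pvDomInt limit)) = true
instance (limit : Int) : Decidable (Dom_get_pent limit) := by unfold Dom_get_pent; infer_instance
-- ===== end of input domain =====

-- B replaces A's unbounded while-loop with per-element threshold tests by a binary search
-- for the two index bounds plus one range comprehension (objective: alternative).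
-- (Both loops are written on an explicit Nat fuel that is a totality guard only:
-- the fuel chosen at the call site is proved sufficient, so the 0-fuel branch is unreachable.)

-- ===== PORT A =====
-- A's 'while(1)' loop; fuel ≥ (limit - i).toNat + 1 suffices since i ≤ i*(3*i-1)//2.
def getPentLoop (fuel : Nat) (limit i : Int) (results : List Int) : List Int :=
  match fuel with
  | 0 => results
  | fuel + 1 =>
    if PySem.Int.floordiv (i * (3 * i - 1)) 2 < limit then
      getPentLoop fuel limit (i + 1)
        (if 1000 ≤ PySem.Int.floordiv (i * (3 * i - 1)) 2 then
          results ++ [PySem.Int.floordiv (i * (3 * i - 1)) 2]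
        else results)
    else results

def get_pent (limit : Int) : List Int := getPentLoop ((limit - 1).toNat + 1) limit 1 []

-- ===== PORT B =====
-- B's binary-search loop; hi - lo shrinks each step, so fuel ≥ (hi - lo).toNat + 1 suffices.
def firstPentAtLeastLoop (fuel : Nat) (target lo hi : Int) : Int :=
  match fuel with
  | 0 => lo
  | fuel + 1 =>
    if lo < hi then
      if PySem.Int.floordiv (PySem.Int.floordiv (lo + hi) 2 *
          (3 * PySem.Int.floordiv (lo + hi) 2 - 1)) 2 < target then
        firstPentAtLeastLoop fuel target (PySem.Int.floordiv (lo + hi) 2 + 1) hi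
      else
        firstPentAtLeastLoop fuel target lo (PySem.Int.floordiv (lo + hi) 2)
    else lo

def first_pent_at_least (target : Int) : Int :=
  firstPentAtLeastLoop ((max 1 target - 1).toNat + 1) target 1 (max 1 target)

def get_pent_alt (limit : Int) : List Int :=
  (PySem.List.pyRange (first_pent_at_least 1000) (first_pent_at_least limit) 1).map
    (fun i => PySem.Int.floordiv (i * (3 * i - 1)) 2)

-- ===== PRECONDITION & SPEC =====
def Spec_get_pent (limit : Int) (out : List Int) : Prop := out = get_pent_alt limit
instance (limit : Int) (out : List Int) : Decidable (Spec_get_pent limit out) := by unfold Spec_get_pent; infer_instance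

-- ===== CLAIM (what is proved, stated in full; the proofs are below) =====
def Claim_equal_get_pent : Prop := ∀ (limit : Int), Dom_get_pent limit → Spec_get_pent limit (get_pent limit)

-- ===== LEMMAS AND PROOFS =====

theorem pent_two (i : Int) :
    PySem.Int.floordiv (i * (3 * i - 1)) 2 * 2 = i * (3 * i - 1) := by
  have hdvd : (2 : Int) ∣ i * (3 * i - 1) := by
    rcases Int.even_or_odd i with ⟨k, hk⟩ | ⟨k, hk⟩
    · exact ⟨k * (3 * i - 1), by rw [hk]; ring⟩
    · exact ⟨i * (3 * k + 1), by rw [hk]; ring⟩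
  have hm : PySem.Int.mod (i * (3 * i - 1)) 2 = 0 :=
    (PySem.Int.mod_eq_zero_iff_dvd _ _).mpr hdvd
  have h := PySem.Int.floordiv_mul_add_mod (i * (3 * i - 1)) 2
  omega

theorem sq_sub_nonneg (i : Int) : 0 ≤ i * (i - 1) := by
  rcases le_or_gt 1 i with h | h
  · exact mul_nonneg (by omega) (by omega)
  · have h0 : 0 ≤ (-i) * (1 - i) := mul_nonneg (by omega) (by omega)
    have key : i * (i - 1) = (-i) * (1 - i) := by ring
    linarith

theorem pent_ge_index (i : Int) :
    i ≤ PySem.Int.floordiv (i * (3 * i - 1)) 2 := by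
  have h2 := pent_two i
  have h0 := sq_sub_nonneg i
  have key : i * (3 * i - 1) - i * 2 = 3 * (i * (i - 1)) := by ring
  linarith

theorem pent_mono {a b : Int} (ha : 1 ≤ a) (hab : a ≤ b) :
    PySem.Int.floordiv (a * (3 * a - 1)) 2 ≤ PySem.Int.floordiv (b * (3 * b - 1)) 2 := by
  have h1 := pent_two a
  have h2 := pent_two b
  have h0 : 0 ≤ (b - a) * (3 * (a + b) - 1) := mul_nonneg (by omega) (by omega)
  have key : b * (3 * b - 1) - a * (3 * a - 1) = (b - a) * (3 * (a + b) - 1) := by ring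
  linarith

theorem bs_spec (target : Int) (fuel : Nat) : ∀ (lo hi : Int), (hi - lo).toNat < fuel →
    1 ≤ lo → lo ≤ hi →
    (∀ j, 1 ≤ j → j < lo → PySem.Int.floordiv (j * (3 * j - 1)) 2 < target) →
    target ≤ PySem.Int.floordiv (hi * (3 * hi - 1)) 2 →
    1 ≤ firstPentAtLeastLoop fuel target lo hi ∧
    (∀ j, 1 ≤ j → j < firstPentAtLeastLoop fuel target lo hi →
        PySem.Int.floordiv (j * (3 * j - 1)) 2 < target) ∧
    target ≤ PySem.Int.floordiv (firstPentAtLeastLoop fuel target lo hi *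
        (3 * firstPentAtLeastLoop fuel target lo hi - 1)) 2 := by
  induction fuel with
  | zero => intro lo hi hfuel; omega
  | succ fuel ih =>
    intro lo hi hfuel hlo hlohi hbelow habove
    have hmid := PySem.Int.floordiv_two_mid_bounds hlohi
    rw [firstPentAtLeastLoop]
    split
    case isTrue hltlohi =>
      have hmidhi : PySem.Int.floordiv (lo + hi) 2 < hi := by
        rw [PySem.Int.floordiv_lt_iff_lt_mul (by norm_num)]
        omega
      split
      case isTrue hplt =>
        exact ih (PySem.Int.floordiv (lo + hi) 2 + 1) hi (by omega) (by omega) (by omega)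
          (fun j hj1 hj2 =>
            lt_of_le_of_lt (pent_mono hj1 (by omega : j ≤ PySem.Int.floordiv (lo + hi) 2)) hplt)
          habove
      case isFalse hpge =>
        exact ih lo (PySem.Int.floordiv (lo + hi) 2) (by omega) hlo (by omega) hbelow
          (le_of_not_gt hpge)
    case isFalse h =>
      have hle : lo = hi := by omega
      exact ⟨hlo, hbelow, hle ▸ habove⟩

theorem loop_spec (limit E : Int) (hE1 : 1 ≤ E)
    (hlt : ∀ j, 1 ≤ j → j < E → PySem.Int.floordiv (j * (3 * j - 1)) 2 < limit)
    (hge : limit ≤ PySem.Int.floordiv (E * (3 * E - 1)) 2)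
    (fuel : Nat) : ∀ (i : Int) (acc : List Int), 1 ≤ i → (limit - i).toNat < fuel →
    getPentLoop fuel limit i acc = acc ++
      (PySem.List.pyRange i E 1).filterMap
        (fun j => if 1000 ≤ PySem.Int.floordiv (j * (3 * j - 1)) 2 then
          some (PySem.Int.floordiv (j * (3 * j - 1)) 2) else none) := by
  induction fuel with
  | zero => intro i acc hi1 hfuel; omega
  | succ fuel ih =>
    intro i acc hi1 hfuel
    rw [getPentLoop]
    split
    case isTrue h =>
      have hiE : i < E := by
        by_contra hc
        push Not at hc
        exact absurd (lt_of_le_of_lt (le_trans hge (pent_mono hE1 hc)) h) (lt_irrefl _)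
      have hilim : i < limit := lt_of_le_of_lt (pent_ge_index i) h
      rw [ih (i + 1) _ (by omega) (by omega),
        PySem.List.pyRange_one_cons hiE, List.filterMap_cons]
      split
      · simp
      · simp
    case isFalse h =>
      have hEi : E ≤ i := by
        by_contra hc
        push Not at hc
        exact h (hlt i hi1 hc)
      rw [PySem.List.pyRange_one_eq_nil hEi]
      simp

theorem pent_25 : PySem.Int.floordiv ((25 : Int) * (3 * 25 - 1)) 2 = 925 := by decide

theorem pent_26 : PySem.Int.floordiv ((26 : Int) * (3 * 26 - 1)) 2 = 1001 := by decide

theorem first_ge_spec (target : Int) :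
    1 ≤ first_pent_at_least target ∧
    (∀ j, 1 ≤ j → j < first_pent_at_least target →
        PySem.Int.floordiv (j * (3 * j - 1)) 2 < target) ∧
    target ≤ PySem.Int.floordiv (first_pent_at_least target *
        (3 * first_pent_at_least target - 1)) 2 := by
  have habove : target ≤ PySem.Int.floordiv (max 1 target * (3 * max 1 target - 1)) 2 :=
    le_trans (le_max_right _ _) (pent_ge_index _)
  exact bs_spec target ((max 1 target - 1).toNat + 1) 1 (max 1 target) (by omega)
    le_rfl (le_max_left _ _) (by intro j hj1 hj2; omega) habove

theorem range_filter_eq (E : Int) :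
    (PySem.List.pyRange 1 E 1).filterMap
        (fun j => if 1000 ≤ PySem.Int.floordiv (j * (3 * j - 1)) 2 then
          some (PySem.Int.floordiv (j * (3 * j - 1)) 2) else none) =
    (PySem.List.pyRange 26 E 1).map (fun i => PySem.Int.floordiv (i * (3 * i - 1)) 2) := by
  have hnone : ∀ j : Int, 1 ≤ j → j < 26 →
      (if 1000 ≤ PySem.Int.floordiv (j * (3 * j - 1)) 2 then
        some (PySem.Int.floordiv (j * (3 * j - 1)) 2) else none) = none := by
    intro j hj1 hj2
    have : PySem.Int.floordiv (j * (3 * j - 1)) 2 ≤ 925 :=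
      pent_25 ▸ pent_mono hj1 (by omega)
    rw [if_neg (by omega)]
  rcases le_or_gt E 26 with hE | hE
  · rw [PySem.List.pyRange_one_eq_nil hE, List.map_nil, List.filterMap_eq_nil_iff.mpr]
    intro a ha
    rw [PySem.List.mem_pyRange_one] at ha
    exact hnone a ha.1 (by omega)
  · rw [PySem.List.pyRange_one_append 1 26 E (by norm_num) (by omega), List.filterMap_append,
      List.filterMap_eq_nil_iff.mpr (fun a ha => by
        rw [PySem.List.mem_pyRange_one] at ha
        exact hnone a ha.1 ha.2), List.nil_append,
      List.filterMap_congr (g := fun j => some (PySem.Int.floordiv (j * (3 * j - 1)) 2))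
        (fun a ha => by
          rw [PySem.List.mem_pyRange_one] at ha
          have : (1001 : Int) ≤ PySem.Int.floordiv (a * (3 * a - 1)) 2 :=
            pent_26 ▸ pent_mono (by norm_num) ha.1
          rw [if_pos (by omega)])]
    exact congrFun List.filterMap_eq_map _

-- ===== VERDICT (by name: the statement is the Claim_ definition above) =====
theorem get_pent_spec : Claim_equal_get_pent := by
  intro limit _
  unfold Spec_get_pent get_pent get_pent_alt
  have hstart : first_pent_at_least 1000 = 26 := by
    obtain ⟨hr1, hrlt, hrge⟩ := first_ge_spec 1000
    by_contra hne
    rcases lt_or_gt_of_ne hne with hc | hc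
    · have := pent_25 ▸ pent_mono hr1 (by omega : first_pent_at_least 1000 ≤ 25)
      omega
    · have := hrlt 26 (by norm_num) (by omega)
      rw [pent_26] at this
      omega
  obtain ⟨hE1, hlt, hge⟩ := first_ge_spec limit
  rw [loop_spec limit (first_pent_at_least limit) hE1 hlt hge ((limit - 1).toNat + 1) 1 []
      le_rfl (by omega), List.nil_append, range_filter_eq, hstart]
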